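-- pv_equiv track=rewrite | github.com/miliar/Code_Jam_Webscraper | solutions_python/Problem_203/335.py | makeCakeString
-- ===== SOURCE A (Python) =====
-- def makeCakeString(startingCakeLines):
--     ''' Makes a cake string, given the lines (rows) to start with as a
--         list of strings '''
--     emptyStartLines = 0
--     lines = []
--     for line in startingCakeLines:
--         newLine = ''
--         firstChar = ''
--         for c in line:
--             if c != '?':
--                 firstChar = c
--                 break
--         if firstChar == '':
--             if len(lines) == 0:
--                 emptyStartLines += 1
--             else:
--                 lines = lines + [lines[-1]]
--             continue
--         for c in line:
--             if c != '?' and c != firstChar: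
--                 firstChar = c
--             newLine = newLine + firstChar
--         lines += [newLine]
--     s = (lines[0]+'\n')*emptyStartLines
--     for line in lines:
--         s += line + '\n'
--     return s
-- ===== SOURCE B (Python) =====
-- def makeCakeString(startingCakeLines):
--     ''' Makes a cake string, given the lines (rows) to start with as a
--         list of strings '''
--     def spread(values, positions, total):
--         # positions: sorted indices where a value is known; every index
--         # i < total takes the value at the last known position <= i
--         # (indices before the first known position take the first value).
--         ends = positions[1:] + [total]
--         out = [values[0]] * positions[0]
--         for v, p, e in zip(values, positions, ends):
--             out += [v] * (e - p)
--         return out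
--
--     filled = []
--     for line in startingCakeLines:
--         known = [(j, c) for j, c in enumerate(line) if c != '?']
--         if known:
--             filled.append(''.join(spread([c for _, c in known],
--                                          [j for j, _ in known], len(line))))
--         else:
--             filled.append(None)
--     known = [(i, f) for i, f in enumerate(filled) if f is not None]
--     rows = spread([f for _, f in known], [i for i, _ in known], len(filled))
--     return ''.join(r + '\n' for r in rows)
-- ===== Notes on version B (the rewrite author's own statement) =====
-- stated objective: alternative
-- what changed: A forward-propagates the current character/row through one fused scan with break/continue control flow; B instead collects the positions of the known (non-'?') entries and builds each filled row, and the row list itself, by run-length segment construction (each known value repeated up to the next known position) with one generic 'spread' helper used at both the character and the row level.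
import Mathlib
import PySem

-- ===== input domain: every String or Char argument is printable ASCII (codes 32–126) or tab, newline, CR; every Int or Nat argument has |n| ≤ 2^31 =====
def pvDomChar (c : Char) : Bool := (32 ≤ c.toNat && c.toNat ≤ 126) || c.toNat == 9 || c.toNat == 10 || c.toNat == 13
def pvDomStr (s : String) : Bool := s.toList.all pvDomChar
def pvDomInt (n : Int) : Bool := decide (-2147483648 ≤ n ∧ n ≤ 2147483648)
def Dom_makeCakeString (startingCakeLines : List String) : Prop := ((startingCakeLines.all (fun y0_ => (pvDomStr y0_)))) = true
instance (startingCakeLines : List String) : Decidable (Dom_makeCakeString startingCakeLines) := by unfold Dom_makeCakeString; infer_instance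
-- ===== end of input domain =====

-- B replaces A's fused forward-propagation scan by run-length segment construction from the
-- positions of the known (non-'?') entries, one generic 'spread' used at char and row level.
-- Objective: alternative.


-- ===== PORT A =====
-- strings are handled as List Char; String.ofList only at the end
-- 'for c in line: if c != '?': firstChar = c; break'  (firstChar = '' ↦ none)
def pvA_firstNonQ : List Char → Option Char
  | [] => none
  | c :: cs => if c ≠ '?' then some c else pvA_firstNonQ cs

-- 'for c in line: if c != '?' and c != firstChar: firstChar = c; newLine = newLine + firstChar'
def pvA_fill : List Char → List Char → Char → List Char × Char
  | [], nl, f => (nl, f)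
  | c :: cs, nl, f =>
      let f' := if c ≠ '?' ∧ c ≠ f then c else f
      pvA_fill cs (nl ++ [f']) f'

-- body of A's main loop; state = (emptyStartLines, lines)
def pvA_step (st : Nat × List (List Char)) (line : List Char) : Nat × List (List Char) :=
  match pvA_firstNonQ line with
  | none =>
      if st.2.length = 0 then (st.1 + 1, st.2)
      else (st.1, st.2 ++ [st.2.getLast?.getD []])   -- lines[-1]; list nonempty here, getD unreachable
  | some fc => (st.1, st.2 ++ [(pvA_fill line [] fc).1])

-- (lines[0]+'\n') * emptyStartLines
def pvA_repeat : Nat → List Char → List Char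
  | 0, _ => []
  | n + 1, s => s ++ pvA_repeat n s

def makeCakeString (startingCakeLines : List String) : String :=
  let st := (startingCakeLines.map String.toList).foldl pvA_step (0, [])
  -- lines[0]: Python raises IndexError when st.2 = [] — excluded by Pre_; headD's default unreachable
  let s0 := pvA_repeat st.1 (st.2.headD [] ++ ['\n'])
  String.ofList (st.2.foldl (fun s l => s ++ l ++ ['\n']) s0)

-- ===== PORT B =====
-- enumerate(xs) with explicit start counter
def pvEnum {α : Type} : Nat → List α → List (Nat × α)
  | _, [] => []
  | s, x :: xs => (s, x) :: pvEnum (s + 1) xs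

-- spread(values, positions, total): segment construction; 'values[0]' on empty input would
-- raise in Python (excluded by Pre_), here the unreachable default dflt
def pvSpread {α : Type} (dflt : α) (values : List α) (positions : List Nat) (total : Nat) : List α :=
  let ends := positions.drop 1 ++ [total]
  (values.zip (positions.zip ends)).foldl
    (fun out vpe => out ++ List.replicate (vpe.2.2 - vpe.2.1) vpe.1)
    (List.replicate (positions.headD 0) (values.headD dflt))

-- known = [(j, c) for j, c in enumerate(line) if c != '?'], then spread or None
def pvB_fillRow (line : List Char) : Option (List Char) :=
  let known := (pvEnum 0 line).filter (fun p => p.2 ≠ '?')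
  if known.isEmpty then none
  else some (pvSpread '?' (known.map Prod.snd) (known.map Prod.fst) line.length)

def makeCakeString_alt (startingCakeLines : List String) : String :=
  let filled := startingCakeLines.map (fun l => pvB_fillRow l.toList)
  let known := (pvEnum 0 filled).filter (fun p => p.2.isSome)
  let rows := pvSpread [] (known.map (fun p => p.2.getD [])) (known.map Prod.fst) filled.length
  String.ofList ((rows.map (· ++ ['\n'])).flatten)

-- ===== PRECONDITION & SPEC =====
-- Pre_ excludes inputs where every line is entirely '?' (or there are no lines): there Python A
-- (and Python B alike) raises IndexError at lines[0] / values[0].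
def Pre_makeCakeString (startingCakeLines : List String) : Prop :=
  (startingCakeLines.any (fun line => line.toList.any (fun c => c ≠ '?'))) = true
instance (startingCakeLines : List String) : Decidable (Pre_makeCakeString startingCakeLines) := by
  unfold Pre_makeCakeString; infer_instance

def pvWitness_makeCakeString : List String := ["?a?", "???"]

def Spec_makeCakeString (startingCakeLines : List String) (out : String) : Prop := out = makeCakeString_alt startingCakeLines
instance (startingCakeLines : List String) (out : String) : Decidable (Spec_makeCakeString startingCakeLines out) := by unfold Spec_makeCakeString; infer_instance

-- ===== CLAIM (what is proved, stated in full; the proofs are below) =====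
def Claim_equal_makeCakeString : Prop := ∀ (startingCakeLines : List String), Dom_makeCakeString startingCakeLines → Pre_makeCakeString startingCakeLines → Spec_makeCakeString startingCakeLines (makeCakeString startingCakeLines)

-- ===== LEMMAS AND PROOFS =====
-- proof-side reference functions
def pvToOpt (c : Char) : Option Char := if c = '?' then none else some c

-- forward fill carrying the last seen value
def pvFillS {α : Type} : α → List (Option α) → List α
  | _, [] => []
  | cur, none :: t => cur :: pvFillS cur t
  | _, some v :: t => v :: pvFillS v t

-- (position, value) pairs of the known entries, positions starting at s
def pvKnowns {α : Type} : Nat → List (Option α) → List (Nat × α)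
  | _, [] => []
  | s, none :: t => pvKnowns (s + 1) t
  | s, some v :: t => (s, v) :: pvKnowns (s + 1) t

-- the segments of spread after the leading block
def pvSegs {α : Type} : List (Nat × α) → Nat → List α
  | [], _ => []
  | (p, v) :: rest, total =>
      List.replicate ((match rest with | [] => total | (q, _) :: _ => q) - p) v ++ pvSegs rest total

-- A's main-loop body abstracted over the already-filled optional row
def pvCollectC (st : Nat × List (List Char)) (f : Option (List Char)) : Nat × List (List Char) :=
  match f with
  | none =>
      if st.2.length = 0 then (st.1 + 1, st.2)
      else (st.1, st.2 ++ [st.2.getLast?.getD []])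
  | some r => (st.1, st.2 ++ [r])

def pvOptRow (line : List Char) : Option (List Char) :=
  match pvA_firstNonQ line with
  | none => none
  | some f => some (pvFillS f (line.map pvToOpt))

lemma pvSH {α : Type} (opt : List (Option α)) : ∀ s : Nat,
    pvKnowns (s + 1) opt = (pvKnowns s opt).map (fun pv => (pv.1 + 1, pv.2)) := by
  induction opt with
  | nil => intro s; rfl
  | cons o t ih => intro s; cases o <;> simp [pvKnowns, ih]

lemma pvShiftCons {α : Type} (t : List (Option α)) (p : Nat) (v : α) (rest : List (Nat × α))
    (h : pvKnowns 0 (none :: t) = (p, v) :: rest) :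
    ∃ p' rest', pvKnowns 0 t = (p', v) :: rest' ∧ p = p' + 1 ∧
      rest = rest'.map (fun pv => (pv.1 + 1, pv.2)) := by
  rw [show pvKnowns 0 (none :: t) = pvKnowns 1 t from rfl, pvSH] at h
  cases hk : pvKnowns 0 t with
  | nil => rw [hk] at h; simp at h
  | cons hd tl =>
      rw [hk] at h
      simp only [List.map_cons, List.cons.injEq, Prod.mk.injEq] at h
      obtain ⟨⟨hp, hv⟩, hr⟩ := h
      refine ⟨hd.1, tl, ?_, hp.symm, hr.symm⟩
      simp [← hv]

lemma pvN {α : Type} (opt : List (Option α)) (cur : α)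
    (h : pvKnowns 0 opt = []) : pvFillS cur opt = List.replicate opt.length cur := by
  induction opt generalizing cur with
  | nil => rfl
  | cons o t ih =>
      cases o with
      | none =>
          rw [show pvKnowns 0 (none :: t) = pvKnowns 1 t from rfl, pvSH] at h
          have h0 : pvKnowns 0 t = [] := List.map_eq_nil_iff.mp h
          simp [pvFillS, List.replicate_succ, ih cur h0]
      | some v => simp [pvKnowns] at h

lemma pvSEGSH {α : Type} (K : List (Nat × α)) : ∀ T : Nat,
    pvSegs (K.map (fun pv => (pv.1 + 1, pv.2))) (T + 1) = pvSegs K T := by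
  induction K with
  | nil => intro T; rfl
  | cons hd tl ih =>
      intro T
      cases tl with
      | nil =>
          simp only [List.map_cons, List.map_nil, pvSegs]
          rw [show T + 1 - (hd.1 + 1) = T - hd.1 from by omega]
      | cons hd2 tl2 =>
          rw [List.map_cons, List.map_cons,
            show pvSegs ((hd.1 + 1, hd.2) :: (hd2.1 + 1, hd2.2)
                  :: tl2.map (fun pv => (pv.1 + 1, pv.2))) (T + 1)
              = List.replicate ((hd2.1 + 1) - (hd.1 + 1)) hd.2
                  ++ pvSegs ((hd2.1 + 1, hd2.2) :: tl2.map (fun pv => (pv.1 + 1, pv.2))) (T + 1)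
              from rfl,
            show ((hd2.1 + 1, hd2.2) :: tl2.map (fun pv => (pv.1 + 1, pv.2)))
              = (hd2 :: tl2).map (fun pv => (pv.1 + 1, pv.2)) from by simp,
            ih T,
            show pvSegs (hd :: hd2 :: tl2) T
              = List.replicate (hd2.1 - hd.1) hd.2 ++ pvSegs (hd2 :: tl2) T from rfl,
            show hd2.1 + 1 - (hd.1 + 1) = hd2.1 - hd.1 from by omega]

lemma pvG {α : Type} (opt : List (Option α)) : ∀ (cur : α) (p : Nat) (v : α) (rest : List (Nat × α)),
    pvKnowns 0 opt = (p, v) :: rest →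
    pvFillS cur opt = List.replicate p cur ++ pvSegs ((p, v) :: rest) opt.length := by
  induction opt with
  | nil => intro cur p v rest h; simp [pvKnowns] at h
  | cons o t ih =>
      intro cur p v rest h
      cases o with
      | none =>
          obtain ⟨p', rest', hk, hp, hr⟩ := pvShiftCons t p v rest h
          subst hp hr
          have hIH := ih cur p' v rest' hk
          rw [show pvFillS cur (none :: t) = cur :: pvFillS cur t from rfl, hIH]
          rw [show ((p' + 1, v) :: rest'.map (fun pv => (pv.1 + 1, pv.2)))
                = ((p', v) :: rest').map (fun pv => (pv.1 + 1, pv.2)) from by simp]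
          rw [show (none :: t).length = t.length + 1 from by simp, pvSEGSH]
          simp [List.replicate_succ]
      | some w =>
          rw [show pvKnowns 0 (some w :: t) = (0, w) :: pvKnowns 1 t from rfl, pvSH] at h
          simp only [List.cons.injEq, Prod.mk.injEq] at h
          obtain ⟨⟨hp, hv⟩, hr⟩ := h
          rw [← hp, ← hv, ← hr]
          cases hk : pvKnowns 0 t with
          | nil =>
              rw [show pvFillS cur (some w :: t) = w :: pvFillS w t from rfl, pvN t w hk]
              simp only [List.map_nil, pvSegs, List.length_cons, List.append_nil,
                List.replicate_zero, List.nil_append]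
              rw [show t.length + 1 - 0 = t.length + 1 from by omega]
              simp [List.replicate_succ]
          | cons hd2 tl2 =>
              have hIH := ih w hd2.1 hd2.2 tl2 (by rw [hk])
              rw [show pvFillS cur (some w :: t) = w :: pvFillS w t from rfl, hIH]
              rw [List.map_cons,
                show pvSegs (((0 : Nat), w) :: (hd2.1 + 1, hd2.2)
                      :: List.map (fun pv => (pv.1 + 1, pv.2)) tl2) ((some w :: t).length)
                    = List.replicate (hd2.1 + 1 - 0) w
                        ++ pvSegs ((hd2.1 + 1, hd2.2) :: List.map (fun pv => (pv.1 + 1, pv.2)) tl2)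
                            ((some w :: t).length) from rfl,
                show ((hd2.1 + 1, hd2.2) :: List.map (fun pv => (pv.1 + 1, pv.2)) tl2)
                    = (hd2 :: tl2).map (fun pv => (pv.1 + 1, pv.2)) from by simp,
                show (some w :: t).length = t.length + 1 from by simp, pvSEGSH,
                show hd2.1 + 1 - 0 = hd2.1 + 1 from by omega]
              simp [List.replicate_succ]

lemma pvS1 {α : Type} (K : List (Nat × α)) : ∀ (total : Nat) (init : List α),
    ((K.map Prod.snd).zip ((K.map Prod.fst).zip ((K.map Prod.fst).drop 1 ++ [total]))).foldl
      (fun out vpe => out ++ List.replicate (vpe.2.2 - vpe.2.1) vpe.1) init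
    = init ++ pvSegs K total := by
  induction K with
  | nil => intro total init; simp [pvSegs]
  | cons hd tl ih =>
      intro total init
      cases tl with
      | nil => simp [pvSegs]
      | cons hd2 tl2 =>
          have e1 : ((hd :: hd2 :: tl2).map Prod.fst).drop 1 ++ [total]
              = hd2.1 :: (((hd2 :: tl2).map Prod.fst).drop 1 ++ [total]) := by simp
          have e2 : (hd :: hd2 :: tl2).map (Prod.snd (α := Nat) (β := α))
              = hd.2 :: (hd2 :: tl2).map Prod.snd := by simp
          have e3 : (hd :: hd2 :: tl2).map (Prod.fst (α := Nat) (β := α))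
              = hd.1 :: (hd2 :: tl2).map Prod.fst := by simp
          rw [e1, e2, e3, List.zip_cons_cons, List.zip_cons_cons, List.foldl_cons,
            ih total (init ++ List.replicate (hd2.1 - hd.1) hd.2)]
          simp [pvSegs, List.append_assoc]

lemma pvMASTER {α : Type} (dflt : α) (opt : List (Option α)) (p : Nat) (v : α) (rest : List (Nat × α))
    (h : pvKnowns 0 opt = (p, v) :: rest) :
    pvSpread dflt ((pvKnowns 0 opt).map Prod.snd) ((pvKnowns 0 opt).map Prod.fst) opt.length
      = pvFillS v opt := by
  unfold pvSpread
  rw [h, pvS1]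
  simp only [List.map_cons, List.headD_cons]
  exact (pvG opt v p v rest h).symm

lemma pvENC (line : List Char) : ∀ s : Nat,
    (pvEnum s line).filter (fun p => p.2 ≠ '?') = pvKnowns s (line.map pvToOpt) := by
  induction line with
  | nil => intro s; rfl
  | cons c cs ih =>
      intro s
      by_cases h : c = '?'
      · simpa [pvEnum, pvToOpt, pvKnowns, h] using ih (s + 1)
      · simpa [pvEnum, pvToOpt, pvKnowns, h] using ih (s + 1)

lemma pvENOfst {α : Type} (opt : List (Option α)) : ∀ s : Nat,
    ((pvEnum s opt).filter (fun p => p.2.isSome)).map Prod.fst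
      = (pvKnowns s opt).map Prod.fst := by
  induction opt with
  | nil => intro s; rfl
  | cons o t ih => intro s; cases o <;> simp [pvEnum, pvKnowns, ih]

lemma pvENOsnd {α : Type} (d : α) (opt : List (Option α)) : ∀ s : Nat,
    ((pvEnum s opt).filter (fun p => p.2.isSome)).map (fun p => p.2.getD d)
      = (pvKnowns s opt).map Prod.snd := by
  induction opt with
  | nil => intro s; rfl
  | cons o t ih => intro s; cases o <;> simp [pvEnum, pvKnowns, ih]

lemma pvFillA_eq (l : List Char) : ∀ (nl : List Char) (f : Char),
    (pvA_fill l nl f).1 = nl ++ pvFillS f (l.map pvToOpt) := by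
  induction l with
  | nil => intro nl f; simp [pvA_fill, pvFillS]
  | cons c cs ih =>
      intro nl f
      by_cases h : c = '?'
      · have hf : (if c ≠ '?' ∧ c ≠ f then c else f) = f := by simp [h]
        rw [show pvA_fill (c :: cs) nl f
              = pvA_fill cs (nl ++ [if c ≠ '?' ∧ c ≠ f then c else f])
                  (if c ≠ '?' ∧ c ≠ f then c else f) from rfl, hf, ih]
        simp [pvToOpt, pvFillS, h]
      · have hf : (if c ≠ '?' ∧ c ≠ f then c else f) = c := by
          by_cases h2 : c = f
          · subst h2; simp
          · simp [h, h2]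
        rw [show pvA_fill (c :: cs) nl f
              = pvA_fill cs (nl ++ [if c ≠ '?' ∧ c ≠ f then c else f])
                  (if c ≠ '?' ∧ c ≠ f then c else f) from rfl, hf, ih]
        simp [pvToOpt, pvFillS, h]

lemma pvFN (line : List Char) : ∀ s : Nat,
    pvA_firstNonQ line = (pvKnowns s (line.map pvToOpt)).head?.map Prod.snd := by
  induction line with
  | nil => intro s; rfl
  | cons c cs ih =>
      intro s
      by_cases h : c = '?'
      · rw [show pvA_firstNonQ (c :: cs) = pvA_firstNonQ cs from by simp [pvA_firstNonQ, h]]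
        rw [show (c :: cs).map pvToOpt = none :: cs.map pvToOpt from by simp [pvToOpt, h]]
        exact ih (s + 1)
      · rw [show (c :: cs).map pvToOpt = some c :: cs.map pvToOpt from by simp [pvToOpt, h]]
        simp [pvA_firstNonQ, pvKnowns, h]

lemma pvStep_eq (st : Nat × List (List Char)) (line : List Char) :
    pvA_step st line = pvCollectC st (pvOptRow line) := by
  unfold pvA_step pvCollectC pvOptRow
  cases h : pvA_firstNonQ line with
  | none => rfl
  | some f => simp [pvFillA_eq]

lemma pvRowEq (line : List Char) : pvB_fillRow line = pvOptRow line := by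
  unfold pvB_fillRow pvOptRow
  rw [pvENC line 0, pvFN line 0]
  cases hk : pvKnowns 0 (line.map pvToOpt) with
  | nil => simp
  | cons hd tl =>
      simp only [List.isEmpty_cons, List.head?_cons, Option.map_some, Bool.false_eq_true,
        if_false]
      have hm := pvMASTER '?' (line.map pvToOpt) hd.1 hd.2 tl (by rw [hk])
      rw [hk] at hm
      rw [show line.length = (line.map pvToOpt).length from by simp, hm]

lemma pvCF1 (opt : List (Option (List Char))) : ∀ (k : Nat) (rows : List (List Char)) (r0 : List Char),
    List.foldl pvCollectC (k, rows ++ [r0]) opt = (k, (rows ++ [r0]) ++ pvFillS r0 opt) := by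
  induction opt with
  | nil => intro k rows r0; simp [pvFillS]
  | cons o t ih =>
      intro k rows r0
      cases o with
      | none =>
          have hne : ¬ (rows ++ [r0]).length = 0 := by simp
          have hlast : (rows ++ [r0]).getLast?.getD [] = r0 := by simp
          rw [List.foldl_cons,
            show pvCollectC (k, rows ++ [r0]) none
              = (k, (rows ++ [r0]) ++ [(rows ++ [r0]).getLast?.getD []]) from by
                simp [pvCollectC], hlast,
            show (rows ++ [r0]) ++ [r0] = (rows ++ [r0]) ++ [r0] from rfl,
            ih k (rows ++ [r0]) r0]
          simp [pvFillS, List.append_assoc]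
      | some v =>
          rw [List.foldl_cons,
            show pvCollectC (k, rows ++ [r0]) (some v) = (k, (rows ++ [r0]) ++ [v]) from rfl,
            ih k (rows ++ [r0]) v]
          simp [pvFillS, List.append_assoc]

lemma pvCF (opt : List (Option (List Char))) : ∀ k : Nat,
    List.foldl pvCollectC (k, []) opt =
      match pvKnowns 0 opt with
      | [] => (k + opt.length, [])
      | (p, v) :: _ => (k + p, pvFillS v (opt.drop p)) := by
  induction opt with
  | nil => intro k; rfl
  | cons o t ih =>
      intro k
      cases o with
      | none =>
          rw [show List.foldl pvCollectC (k, []) (none :: t)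
                = List.foldl pvCollectC (k + 1, []) t from rfl, ih (k + 1)]
          rw [show pvKnowns 0 (none :: (t : List (Option (List Char)))) = pvKnowns 1 t from rfl,
            pvSH]
          cases hk : pvKnowns 0 t with
          | nil =>
              simp only [List.map_nil, List.length_cons]
              show ((k + 1) + t.length, ([] : List (List Char))) = (k + (t.length + 1), [])
              simp only [Prod.mk.injEq]
              exact ⟨by omega, trivial⟩
          | cons hd tl =>
              simp only [List.map_cons]
              show ((k + 1) + hd.1, pvFillS hd.2 (t.drop hd.1))
                  = (k + (hd.1 + 1), pvFillS hd.2 ((none :: t).drop (hd.1 + 1)))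
              simp only [Prod.mk.injEq]
              exact ⟨by omega, rfl⟩
      | some v =>
          rw [show List.foldl pvCollectC (k, []) (some v :: t)
                = List.foldl pvCollectC (k, [] ++ [v]) t from rfl, pvCF1 t k [] v]
          rw [show pvKnowns 0 (some v :: (t : List (Option (List Char))))
                = (0, v) :: pvKnowns 1 t from rfl]
          simp [pvFillS]

lemma pvFS2 (opt : List (Option (List Char))) : ∀ (p : Nat) (v : List Char) (rest : List (Nat × List Char)),
    pvKnowns 0 opt = (p, v) :: rest →
    pvFillS v opt = List.replicate p v ++ pvFillS v (opt.drop p) := by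
  induction opt with
  | nil => intro p v rest h; simp [pvKnowns] at h
  | cons o t ih =>
      intro p v rest h
      cases o with
      | none =>
          obtain ⟨p', rest', hk, hp, _⟩ := pvShiftCons t p v rest h
          subst hp
          rw [show (none :: t).drop (p' + 1) = t.drop p' from rfl]
          rw [show pvFillS v (none :: t) = v :: pvFillS v t from rfl, ih p' v rest' hk]
          simp [List.replicate_succ]
      | some w =>
          rw [show pvKnowns 0 (some w :: (t : List (Option (List Char))))
                = (0, w) :: pvKnowns 1 t from rfl] at h
          simp only [List.cons.injEq, Prod.mk.injEq] at h
          obtain ⟨⟨hp, hv⟩, _⟩ := h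
          subst hv
          rw [← hp]
          simp

lemma pvDR (opt : List (Option (List Char))) : ∀ (p : Nat) (v : List Char) (rest : List (Nat × List Char)),
    pvKnowns 0 opt = (p, v) :: rest → ∃ t, opt.drop p = some v :: t := by
  induction opt with
  | nil => intro p v rest h; simp [pvKnowns] at h
  | cons o t ih =>
      intro p v rest h
      cases o with
      | none =>
          obtain ⟨p', rest', hk, hp, _⟩ := pvShiftCons t p v rest h
          subst hp
          rw [show (none :: t).drop (p' + 1) = t.drop p' from rfl]
          exact ih p' v rest' hk
      | some w =>
          rw [show pvKnowns 0 (some w :: (t : List (Option (List Char))))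
                = (0, w) :: pvKnowns 1 t from rfl] at h
          simp only [List.cons.injEq, Prod.mk.injEq] at h
          obtain ⟨⟨hp, hv⟩, _⟩ := h
          subst hv
          rw [← hp]
          exact ⟨t, rfl⟩

lemma pvKNE (opt : List (Option (List Char))) (o : Option (List Char)) (ho : o ∈ opt)
    (hs : o.isSome) : pvKnowns 0 opt ≠ [] := by
  induction opt with
  | nil => cases ho
  | cons hd t ih =>
      cases hd with
      | none =>
          rw [show pvKnowns 0 (none :: (t : List (Option (List Char)))) = pvKnowns 1 t from rfl,
            pvSH]
          rcases List.mem_cons.mp ho with h | h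
          · subst h; simp at hs
          · intro hc
            exact ih h (List.map_eq_nil_iff.mp hc)
      | some v => simp [pvKnowns]

lemma pvFQN (l : List Char) : pvA_firstNonQ l = none ↔ ∀ c ∈ l, c = '?' := by
  induction l with
  | nil => simp [pvA_firstNonQ]
  | cons c cs ih =>
      by_cases h : c = '?' <;> simp [pvA_firstNonQ, h, ih]

lemma pvRepeat_eq (n : Nat) (s : List Char) :
    pvA_repeat n s = (List.replicate n s).flatten := by
  induction n with
  | zero => rfl
  | succ k ih => simp [pvA_repeat, List.replicate, ih]

lemma pvFoldlNl (rows : List (List Char)) (s0 : List Char) :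
    rows.foldl (fun s l => s ++ l ++ ['\n']) s0 = s0 ++ (rows.map (· ++ ['\n'])).flatten := by
  induction rows generalizing s0 with
  | nil => simp
  | cons r rs ih => simp

-- ===== VERDICT (by name: the statement is the Claim_ definition above) =====
theorem makeCakeString_spec : Claim_equal_makeCakeString := by
  intro startingCakeLines _ hpre
  unfold Spec_makeCakeString makeCakeString makeCakeString_alt
  set filled := startingCakeLines.map (fun l => pvB_fillRow l.toList) with hfilled
  have hAfold : (startingCakeLines.map String.toList).foldl pvA_step (0, [])
      = List.foldl pvCollectC (0, []) filled := by
    rw [hfilled]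
    simp only [List.foldl_map]
    congr 1
    funext st line
    rw [pvStep_eq, pvRowEq]
  have hne : pvKnowns 0 filled ≠ [] := by
    unfold Pre_makeCakeString at hpre
    rw [List.any_eq_true] at hpre
    obtain ⟨line, hmem, hline⟩ := hpre
    have hmemf : pvB_fillRow line.toList ∈ filled := by
      rw [hfilled]; exact List.mem_map_of_mem hmem
    apply pvKNE filled _ hmemf
    unfold pvB_fillRow
    rw [pvENC _ 0]
    cases hk : pvKnowns 0 (line.toList.map pvToOpt) with
    | cons hd tl => simp
    | nil =>
        exfalso
        rw [List.any_eq_true] at hline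
        obtain ⟨c, hc, hcq⟩ := hline
        have h1 : pvA_firstNonQ line.toList = none := by
          rw [pvFN line.toList 0, hk]; rfl
        exact (show c ≠ '?' from by simpa using hcq) ((pvFQN _).mp h1 c hc)
  cases hk : pvKnowns 0 filled with
  | nil => exact absurd hk hne
  | cons hd tl =>
      obtain ⟨p, v⟩ := hd
      rw [hAfold, pvCF filled 0, hk]
      obtain ⟨t, hdrop⟩ := pvDR filled p v tl hk
      have hhead : (pvFillS v (filled.drop p)).headD [] = v := by
        rw [hdrop]; rfl
      simp only [hhead, Nat.zero_add]
      rw [pvRepeat_eq, pvFoldlNl]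
      rw [pvENOfst filled 0, pvENOsnd ([] : List Char) filled 0,
        pvMASTER ([] : List Char) filled p v tl hk]
      rw [pvFS2 filled p v tl hk]
      congr 1
      rw [List.map_append, List.flatten_append, List.map_replicate]
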